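-- pv_equiv track=rewrite | github.com/SylvainCatillon/GrandPy_Bot | app/utils/parser.py | _split_in_words
-- ===== SOURCE A (Python) =====
-- def _split_in_words(sentence):
--     """Takes a string as 'sentence'.
--     Returns a list of lowered words"""
--     assert isinstance(sentence, str)
--     wrong_letters = []
--     for letter in sentence:
--         if letter not in wrong_letters+["-"] and not letter.isalnum():
--             wrong_letters.append(letter)
--     for letter in wrong_letters:
--         sentence = sentence.replace(letter, " "+letter+" ")
--     return sentence.lower().split()
-- ===== SOURCE B (Python) =====
-- def _split_in_words(sentence):
--     """Takes a string as 'sentence'.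
--     Returns a list of lowered words"""
--     assert isinstance(sentence, str)
--     tokens = []
--     buf = []
--     for ch in sentence:
--         if ch.isalnum() or ch == "-":
--             buf.append(ch.lower())
--         else:
--             if buf:
--                 tokens.append("".join(buf))
--                 buf = []
--             if not ch.isspace():
--                 tokens.append(ch.lower())
--     if buf:
--         tokens.append("".join(buf))
--     return tokens
-- ===== Notes on version B (the rewrite author's own statement) =====
-- stated objective: alternative
-- what changed: A collects the distinct non-alphanumeric non-'-' characters, rewrites the whole string once per such character with str.replace to pad it with spaces, then lowercases and splits; B is a single buffered scan over the characters that lowercases word characters into a buffer, flushes the buffer at each non-word character and emits non-whitespace separators as their own tokens, building no intermediate strings.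
import Mathlib
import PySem

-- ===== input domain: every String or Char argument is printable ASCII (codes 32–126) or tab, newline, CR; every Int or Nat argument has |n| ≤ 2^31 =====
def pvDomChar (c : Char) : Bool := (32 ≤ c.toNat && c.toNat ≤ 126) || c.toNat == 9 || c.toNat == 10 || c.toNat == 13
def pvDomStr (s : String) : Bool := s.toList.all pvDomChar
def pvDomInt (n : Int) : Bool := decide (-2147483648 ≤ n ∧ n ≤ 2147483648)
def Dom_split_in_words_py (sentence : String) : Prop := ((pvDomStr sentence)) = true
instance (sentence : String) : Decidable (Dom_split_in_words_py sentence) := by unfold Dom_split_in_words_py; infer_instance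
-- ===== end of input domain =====

-- Alternative implementation: A pads every distinct non-alphanumeric non-'-' character with
-- spaces via repeated str.replace passes and then lowercases and splits; B tokenizes in a
-- single buffered scan over the characters, building no intermediate strings. Same return value.


-- ===== PORT A =====
-- for letter in sentence: if letter not in wrong_letters+["-"] and not letter.isalnum(): append
-- for letter in wrong_letters: sentence = sentence.replace(letter, " "+letter+" ")
-- return sentence.lower().split()
def split_in_words_py (sentence : String) : List String :=
  let wrong_letters : List Char := sentence.toList.foldl
    (fun wl letter =>
      if !(wl ++ ['-']).contains letter && !PySem.Chars.isalnum letter then wl ++ [letter] else wl)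
    []
  let sentence2 : String := wrong_letters.foldl
    (fun s letter =>
      PySem.Str.replace s (String.ofList [letter]) (String.ofList [' ', letter, ' ']))
    sentence
  PySem.Str.split₀ (PySem.Str.lower sentence2)

-- ===== PORT B =====
-- single pass: buffer word chars (alnum or '-') lowered; on a non-word char flush the buffer,
-- then emit the char itself as a token unless it is whitespace.  (ch.lower() on one char = lowerChar)
def split_in_words_py_alt (sentence : String) : List String :=
  let r := sentence.toList.foldl
    (fun (st : List String × List Char) ch =>
      if PySem.Chars.isalnum ch || ch == '-' then
        (st.1, st.2 ++ [PySem.Chars.lowerChar ch])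
      else
        let tokens := if st.2.isEmpty then st.1 else st.1 ++ [String.ofList st.2]
        if PySem.Chars.isspace ch then (tokens, [])
        else (tokens ++ [String.ofList [PySem.Chars.lowerChar ch]], []))
    ([], [])
  if r.2.isEmpty then r.1 else r.1 ++ [String.ofList r.2]

-- ===== PRECONDITION & SPEC =====
def Spec_split_in_words_py (sentence : String) (out : List String) : Prop := out = split_in_words_py_alt sentence
instance (sentence : String) (out : List String) : Decidable (Spec_split_in_words_py sentence out) := by unfold Spec_split_in_words_py; infer_instance

-- ===== CLAIM (what is proved, stated in full; the proofs are below) =====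
def Claim_equal_split_in_words_py : Prop := ∀ (sentence : String), Dom_split_in_words_py sentence → Spec_split_in_words_py sentence (split_in_words_py sentence)

-- ===== LEMMAS AND PROOFS =====

-- word characters (kept in the buffer by B, never replaced by A)
def pvWordChar (c : Char) : Bool := PySem.Chars.isalnum c || c == '-'

-- charwise effect of one replace pass for wrong letter x
def pvExp (x : Char) (c : Char) : List Char := if c = x then [' ', x, ' '] else [c]

-- cumulative charwise effect of all replace passes
def pvE (ws : List Char) (c : Char) : List Char :=
  ws.foldl (fun l x => l.flatMap (pvExp x)) [c]

-- chars-level version of B's fold step (tokens as List (List Char))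
def pvStep (st : List (List Char) × List Char) (c : Char) : List (List Char) × List Char :=
  if pvWordChar c then (st.1, st.2 ++ [PySem.Chars.lowerChar c])
  else
    let tokens := if st.2.isEmpty then st.1 else st.1 ++ [st.2]
    if PySem.Chars.isspace c then (tokens, [])
    else (tokens ++ [[PySem.Chars.lowerChar c]], [])

def pvFinish (st : List (List Char) × List Char) : List (List Char) :=
  if st.2.isEmpty then st.1 else st.1 ++ [st.2]

-- ## character classification facts
theorem pv_le_toNat (a c : Char) : (a ≤ c) ↔ a.toNat ≤ c.toNat := by
  rw [Char.le_def]; exact UInt32.le_iff_toNat_le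

theorem pv_isspace_iff (c : Char) : PySem.Chars.isspace c = true ↔
    (c.toNat = 32 ∨ (9 ≤ c.toNat ∧ c.toNat ≤ 13) ∨ (28 ≤ c.toNat ∧ c.toNat ≤ 31) ∨ c.toNat = 133 ∨
     c.toNat = 160 ∨ c.toNat = 5760 ∨ (8192 ≤ c.toNat ∧ c.toNat ≤ 8202) ∨ c.toNat = 8232 ∨
     c.toNat = 8233 ∨ c.toNat = 8239 ∨ c.toNat = 8287 ∨ c.toNat = 12288) := by
  unfold PySem.Chars.isspace
  simp only [Bool.or_eq_true, Bool.and_eq_true, decide_eq_true_eq]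
  tauto

theorem pv_isalnum_iff (c : Char) : PySem.Chars.isalnum c = true ↔
    ((48 ≤ c.toNat ∧ c.toNat ≤ 57) ∨ (65 ≤ c.toNat ∧ c.toNat ≤ 90) ∨
     (97 ≤ c.toNat ∧ c.toNat ≤ 122)) := by
  unfold PySem.Chars.isalnum PySem.Chars.isalpha PySem.Chars.isdigit PySem.Chars.isupper
    PySem.Chars.islower
  have h0 : ('0' : Char).toNat = 48 := by decide
  have h9 : ('9' : Char).toNat = 57 := by decide
  have hA : ('A' : Char).toNat = 65 := by decide
  have hZ : ('Z' : Char).toNat = 90 := by decide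
  have ha : ('a' : Char).toNat = 97 := by decide
  have hz : ('z' : Char).toNat = 122 := by decide
  simp only [Bool.or_eq_true, Bool.and_eq_true, decide_eq_true_eq, pv_le_toNat,
    h0, h9, hA, hZ, ha, hz]
  tauto

theorem pv_toNat_lowerChar (c : Char) : (PySem.Chars.lowerChar c).toNat =
    if 65 ≤ c.toNat ∧ c.toNat ≤ 90 then c.toNat + 32 else c.toNat := by
  unfold PySem.Chars.lowerChar PySem.Chars.isupper
  have hA : ('A' : Char).toNat = 65 := by decide
  have hZ : ('Z' : Char).toNat = 90 := by decide
  split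
  · rename_i h
    simp only [Bool.and_eq_true, decide_eq_true_eq, pv_le_toNat, hA, hZ] at h
    rw [if_pos h, Char.toNat_ofNat, if_pos (Or.inl (by omega))]
  · rename_i h
    simp only [Bool.and_eq_true, decide_eq_true_eq, pv_le_toNat, hA, hZ] at h
    rw [if_neg h]

theorem pv_isspace_lowerChar (c : Char) :
    PySem.Chars.isspace (PySem.Chars.lowerChar c) = PySem.Chars.isspace c := by
  rw [Bool.eq_iff_iff, pv_isspace_iff, pv_isspace_iff, pv_toNat_lowerChar]
  split <;> omega

theorem pv_word_not_space (c : Char) (h : pvWordChar c = true) :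
    PySem.Chars.isspace c = false := by
  unfold pvWordChar at h
  simp only [Bool.or_eq_true, beq_iff_eq, pv_isalnum_iff] at h
  rw [Bool.eq_false_iff, Ne, pv_isspace_iff]
  have h45 : ('-' : Char).toNat = 45 := by decide
  rcases h with h | h
  · omega
  · subst h; rw [h45]; omega

theorem pv_lowerChar_of_not_alnum (c : Char) (h : PySem.Chars.isalnum c = false) :
    PySem.Chars.lowerChar c = c := by
  rw [Bool.eq_false_iff, Ne, pv_isalnum_iff] at h
  unfold PySem.Chars.lowerChar PySem.Chars.isupper
  have hA : ('A' : Char).toNat = 65 := by decide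
  have hZ : ('Z' : Char).toNat = 90 := by decide
  rw [if_neg]
  simp only [Bool.and_eq_true, decide_eq_true_eq, pv_le_toNat, hA, hZ]
  intro hu
  exact h (Or.inr (Or.inl hu))

theorem pv_space_space : PySem.Chars.isspace ' ' = true := by decide

-- ## replace with a single-character pattern is a flatMap
theorem pv_replace_go_single (x : Char) (new : List Char) :
    ∀ (s : List Char) (k : Nat) (acc : List Char),
      PySem.Chars.replace.go [x] new (s.length + k) s acc
        = acc.reverse ++ s.flatMap (fun c => if c = x then new else [c]) := by
  intro s
  induction s with
  | nil => intro k acc; cases k <;> simp [PySem.Chars.replace.go]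
  | cons c t ih =>
    intro k acc
    have hl : (c :: t).length + k = (t.length + k) + 1 := by simp; omega
    rw [hl]
    by_cases hx : x = c
    · subst hx
      have hpre : List.isPrefixOf [x] (x :: t) = true := by simp [List.isPrefixOf]
      simp only [PySem.Chars.replace.go, hpre, if_pos]
      rw [show List.drop [x].length (x :: t) = t by simp]
      rw [ih k (new.reverse ++ acc)]
      simp
    · have hcx : ¬ c = x := fun h => hx h.symm
      have hpre : List.isPrefixOf [x] (c :: t) = false := by
        simp [List.isPrefixOf]; exact hx
      simp only [PySem.Chars.replace.go, hpre]
      rw [if_neg (by simp)]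
      rw [ih k (c :: acc)]
      simp [hcx]

theorem pv_replace_single (x : Char) (s : List Char) :
    PySem.Chars.replace s [x] [' ', x, ' '] = s.flatMap (pvExp x) := by
  unfold PySem.Chars.replace
  rw [if_neg (by simp)]
  have := pv_replace_go_single x [' ', x, ' '] s 0 []
  simp only [Nat.add_zero, List.reverse_nil, List.nil_append] at this
  rw [this]
  rfl

-- ## folding the replace passes = one flatMap of pvE
theorem pv_foldl_flatMap (ws : List Char) :
    ∀ (cs : List Char),
      ws.foldl (fun s x => s.flatMap (pvExp x)) cs = cs.flatMap (pvE ws) := by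
  induction ws with
  | nil =>
    intro cs
    rw [show pvE ([] : List Char) = fun c => [c] from rfl]
    simp
  | cons x ws ih =>
    intro cs
    rw [List.foldl_cons, ih, List.flatMap_assoc]
    have hfun : pvE (x :: ws) = fun c => (pvExp x c).flatMap (pvE ws) := by
      funext c
      unfold pvE
      rw [List.foldl_cons, show ([c].flatMap (pvExp x)) = pvExp x c by simp]
      exact ih (pvExp x c)
    rw [hfun]

-- ## shape of pvE
theorem pv_E_not_mem (ws : List Char) (c : Char) (h : c ∉ ws) : pvE ws c = [c] := by
  unfold pvE
  induction ws with
  | nil => rfl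
  | cons x ws ih =>
    have hcx : c ≠ x := fun he => h (he ▸ List.mem_cons_self ..)
    rw [List.foldl_cons, show ([c].flatMap (pvExp x)) = [c] by simp [pvExp, hcx]]
    exact ih (fun hm => h (List.mem_cons_of_mem _ hm))

theorem pv_flatMap_space (x : Char) (sp : List Char)
    (h : ∀ d ∈ sp, PySem.Chars.isspace d = true) :
    ∀ d ∈ sp.flatMap (pvExp x), PySem.Chars.isspace d = true := by
  intro d hd
  rw [List.mem_flatMap] at hd
  obtain ⟨e, he, hde⟩ := hd
  unfold pvExp at hde
  split at hde
  · rename_i hex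
    simp only [List.mem_cons, List.not_mem_nil, or_false] at hde
    rcases hde with h1 | h1 | h1
    · rw [h1]; exact pv_space_space
    · rw [h1, ← hex]; exact h e he
    · rw [h1]; exact pv_space_space
  · rw [List.mem_singleton] at hde
    rw [hde]; exact h e he

theorem pv_flatMap_ne (x : Char) (sp : List Char) (h : sp ≠ []) :
    sp.flatMap (pvExp x) ≠ [] := by
  cases sp with
  | nil => exact absurd rfl h
  | cons e sp =>
    simp only [List.flatMap_cons, ne_eq, List.append_eq_nil_iff, not_and]
    intro he
    unfold pvExp at he
    split at he <;> simp at he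

theorem pv_E_space (ws : List Char) (c : Char) (h : PySem.Chars.isspace c = true) :
    pvE ws c ≠ [] ∧ ∀ d ∈ pvE ws c, PySem.Chars.isspace d = true := by
  unfold pvE
  have main : ∀ (ws' l : List Char), l ≠ [] → (∀ d ∈ l, PySem.Chars.isspace d = true) →
      ws'.foldl (fun l x => l.flatMap (pvExp x)) l ≠ [] ∧
      ∀ d ∈ ws'.foldl (fun l x => l.flatMap (pvExp x)) l, PySem.Chars.isspace d = true := by
    intro ws'
    induction ws' with
    | nil => intro l h1 h2; exact ⟨h1, h2⟩
    | cons x ws' ih =>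
      intro l h1 h2
      rw [List.foldl_cons]
      exact ih _ (pv_flatMap_ne x l h1) (pv_flatMap_space x l h2)
  exact main ws [c] (by simp) (by intro d hd; rw [List.mem_singleton] at hd; rw [hd]; exact h)

-- weak invariant: spaces (possibly empty) around c, preserved by any pass
theorem pv_punct_weak (c : Char) (u : List Char) :
    ∀ (sp1 sp2 : List Char),
      (∀ d ∈ sp1, PySem.Chars.isspace d = true) → (∀ d ∈ sp2, PySem.Chars.isspace d = true) →
      ∃ t1 t2, u.foldl (fun l x => l.flatMap (pvExp x)) (sp1 ++ c :: sp2) = t1 ++ c :: t2 ∧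
        (∀ d ∈ t1, PySem.Chars.isspace d = true) ∧ (∀ d ∈ t2, PySem.Chars.isspace d = true) := by
  induction u with
  | nil => intro sp1 sp2 h1 h2; exact ⟨sp1, sp2, rfl, h1, h2⟩
  | cons x u ih =>
    intro sp1 sp2 h1 h2
    rw [List.foldl_cons, List.flatMap_append, List.flatMap_cons]
    by_cases hcx : c = x
    · subst hcx
      rw [show pvExp c c = [' ', c, ' '] from by simp [pvExp]]
      have := ih (sp1.flatMap (pvExp c) ++ [' ']) (' ' :: sp2.flatMap (pvExp c))
        (by intro d hd
            rcases List.mem_append.1 hd with hd | hd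
            · exact pv_flatMap_space c sp1 h1 d hd
            · rw [List.mem_singleton] at hd; rw [hd]; exact pv_space_space)
        (by intro d hd
            rcases List.mem_cons.1 hd with hd | hd
            · rw [hd]; exact pv_space_space
            · exact pv_flatMap_space c sp2 h2 d hd)
      simpa using this
    · rw [show pvExp x c = [c] from by simp [pvExp, hcx]]
      have := ih (sp1.flatMap (pvExp x)) (sp2.flatMap (pvExp x))
        (pv_flatMap_space x sp1 h1) (pv_flatMap_space x sp2 h2)
      simpa using this

-- strong invariant: nonempty spaces around c, preserved by any pass
theorem pv_punct_strong (c : Char) (v : List Char) :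
    ∀ (sp1 sp2 : List Char), sp1 ≠ [] → sp2 ≠ [] →
      (∀ d ∈ sp1, PySem.Chars.isspace d = true) → (∀ d ∈ sp2, PySem.Chars.isspace d = true) →
      ∃ t1 t2, v.foldl (fun l x => l.flatMap (pvExp x)) (sp1 ++ c :: sp2) = t1 ++ c :: t2 ∧
        t1 ≠ [] ∧ t2 ≠ [] ∧
        (∀ d ∈ t1, PySem.Chars.isspace d = true) ∧ (∀ d ∈ t2, PySem.Chars.isspace d = true) := by
  induction v with
  | nil => intro sp1 sp2 hn1 hn2 h1 h2; exact ⟨sp1, sp2, rfl, hn1, hn2, h1, h2⟩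
  | cons x v ih =>
    intro sp1 sp2 hn1 hn2 h1 h2
    rw [List.foldl_cons, List.flatMap_append, List.flatMap_cons]
    by_cases hcx : c = x
    · subst hcx
      rw [show pvExp c c = [' ', c, ' '] from by simp [pvExp]]
      have := ih (sp1.flatMap (pvExp c) ++ [' ']) (' ' :: sp2.flatMap (pvExp c))
        (by simp) (by simp)
        (by intro d hd
            rcases List.mem_append.1 hd with hd | hd
            · exact pv_flatMap_space c sp1 h1 d hd
            · rw [List.mem_singleton] at hd; rw [hd]; exact pv_space_space)
        (by intro d hd
            rcases List.mem_cons.1 hd with hd | hd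
            · rw [hd]; exact pv_space_space
            · exact pv_flatMap_space c sp2 h2 d hd)
      simpa using this
    · rw [show pvExp x c = [c] from by simp [pvExp, hcx]]
      have := ih (sp1.flatMap (pvExp x)) (sp2.flatMap (pvExp x))
        (pv_flatMap_ne x sp1 hn1) (pv_flatMap_ne x sp2 hn2)
        (pv_flatMap_space x sp1 h1) (pv_flatMap_space x sp2 h2)
      simpa using this

theorem pv_E_punct (ws : List Char) (c : Char) (hmem : c ∈ ws) :
    ∃ sp1 sp2, pvE ws c = sp1 ++ c :: sp2 ∧ sp1 ≠ [] ∧ sp2 ≠ [] ∧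
      (∀ d ∈ sp1, PySem.Chars.isspace d = true) ∧ (∀ d ∈ sp2, PySem.Chars.isspace d = true) := by
  obtain ⟨u, v, rfl⟩ := List.append_of_mem hmem
  unfold pvE
  rw [List.foldl_append]
  obtain ⟨t1, t2, heq, hs1, hs2⟩ :=
    pv_punct_weak c u [] [] (by simp) (by simp)
  rw [show ([] : List Char) ++ c :: [] = [c] by simp] at heq
  rw [heq, List.foldl_cons]
  have hstep : (t1 ++ c :: t2).flatMap (pvExp c)
      = (t1.flatMap (pvExp c) ++ [' ']) ++ c :: (' ' :: t2.flatMap (pvExp c)) := by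
    rw [List.flatMap_append, List.flatMap_cons]
    have : pvExp c c = [' ', c, ' '] := by simp [pvExp]
    rw [this]; simp
  rw [hstep]
  exact pv_punct_strong c v _ _ (by simp) (by simp)
    (by intro d hd
        rcases List.mem_append.1 hd with hd | hd
        · exact pv_flatMap_space c t1 hs1 d hd
        · rw [List.mem_singleton] at hd; rw [hd]; exact pv_space_space)
    (by intro d hd
        rcases List.mem_cons.1 hd with hd | hd
        · rw [hd]; exact pv_space_space
        · exact pv_flatMap_space c t2 hs2 d hd)

-- ## membership in A's wrong_letters list
theorem pv_wrong_mem (cs : List Char) :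
    ∀ (wl : List Char) (c : Char),
      (c ∈ cs.foldl (fun wl letter =>
        if !(wl ++ ['-']).contains letter && !PySem.Chars.isalnum letter then wl ++ [letter] else wl) wl)
      ↔ c ∈ wl ∨ (c ∈ cs ∧ PySem.Chars.isalnum c = false ∧ c ≠ '-') := by
  induction cs with
  | nil => intro wl c; simp
  | cons a cs ih =>
    intro wl c
    rw [List.foldl_cons]
    have hmem : ∀ (w : List Char), c ∈ w ++ [a] ↔ c ∈ w ∨ c = a := by simp
    by_cases hcond : a ∈ wl ∨ a = '-' ∨ PySem.Chars.isalnum a = true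
    · have hb : (!(wl ++ ['-']).contains a && !PySem.Chars.isalnum a) = false := by
        rcases hcond with h | h | h <;>
          simp [List.contains_eq_mem, List.mem_append, h]
      rw [if_neg (by rw [hb]; exact Bool.false_ne_true), ih]
      constructor
      · rintro (h | h)
        · exact Or.inl h
        · exact Or.inr ⟨List.mem_cons_of_mem _ h.1, h.2⟩
      · rintro (h | ⟨h1, h2, h3⟩)
        · exact Or.inl h
        · rcases List.mem_cons.1 h1 with h1 | h1
          · subst h1
            rcases hcond with h | h | h
            · exact Or.inl h
            · exact absurd h h3
            · rw [h2] at h; cases h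
          · exact Or.inr ⟨h1, h2, h3⟩
    · have hwl : a ∉ wl := fun h => hcond (Or.inl h)
      have hdash : a ≠ '-' := fun h => hcond (Or.inr (Or.inl h))
      have halnum : ¬ PySem.Chars.isalnum a = true := fun h => hcond (Or.inr (Or.inr h))
      have halnum' : PySem.Chars.isalnum a = false := by
        cases h : PySem.Chars.isalnum a
        · rfl
        · exact absurd h halnum
      have hb : (!(wl ++ ['-']).contains a && !PySem.Chars.isalnum a) = true := by
        simp [List.contains_eq_mem, List.mem_append, hwl, hdash, halnum']
      rw [if_pos hb, ih]
      constructor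
      · rintro (h | h)
        · rcases (hmem wl).1 h with h | h
          · exact Or.inl h
          · subst h; exact Or.inr ⟨List.mem_cons_self .., halnum', hdash⟩
        · exact Or.inr ⟨List.mem_cons_of_mem _ h.1, h.2⟩
      · rintro (h | ⟨h1, h2, h3⟩)
        · exact Or.inl ((hmem wl).2 (Or.inl h))
        · rcases List.mem_cons.1 h1 with h1 | h1
          · subst h1; exact Or.inl ((hmem wl).2 (Or.inr rfl))
          · exact Or.inr ⟨h1, h2, h3⟩

-- ## split₀.go plumbing
theorem pv_go_space (d : Char) (rest cur : List Char) (acc : List (List Char))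
    (h : PySem.Chars.isspace d = true) :
    PySem.Chars.split₀.go (d :: rest) cur acc
      = PySem.Chars.split₀.go rest [] (if cur.isEmpty then acc else cur.reverse :: acc) := by
  by_cases hc : cur.isEmpty <;> simp [PySem.Chars.split₀.go, h, hc]

theorem pv_go_word (d : Char) (rest cur : List Char) (acc : List (List Char))
    (h : PySem.Chars.isspace d = false) :
    PySem.Chars.split₀.go (d :: rest) cur acc = PySem.Chars.split₀.go rest (d :: cur) acc := by
  simp [PySem.Chars.split₀.go, h]

theorem pv_go_spaces (sp : List Char) (hsp : ∀ d ∈ sp, PySem.Chars.isspace d = true) :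
    ∀ (rest : List Char) (acc : List (List Char)),
      PySem.Chars.split₀.go (sp ++ rest) [] acc = PySem.Chars.split₀.go rest [] acc := by
  induction sp with
  | nil => intro rest acc; rfl
  | cons d sp ih =>
    intro rest acc
    rw [List.cons_append, pv_go_space d _ _ _ (hsp d (List.mem_cons_self ..))]
    simp only [List.isEmpty_nil, if_pos]
    exact ih (fun e he => hsp e (List.mem_cons_of_mem _ he)) rest acc

theorem pv_go_flush (sp : List Char) (hne : sp ≠ []) (hsp : ∀ d ∈ sp, PySem.Chars.isspace d = true)
    (rest cur : List Char) (acc : List (List Char)) :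
    PySem.Chars.split₀.go (sp ++ rest) cur acc
      = PySem.Chars.split₀.go rest [] (if cur.isEmpty then acc else cur.reverse :: acc) := by
  cases sp with
  | nil => exact absurd rfl hne
  | cons d sp =>
    rw [List.cons_append, pv_go_space d _ _ _ (hsp d (List.mem_cons_self ..))]
    exact pv_go_spaces sp (fun e he => hsp e (List.mem_cons_of_mem _ he)) rest _

-- ## the main tokenizer invariant
theorem pv_step_word (t : List (List Char)) (b : List Char) (c : Char)
    (h : pvWordChar c = true) :
    pvStep (t, b) c = (t, b ++ [PySem.Chars.lowerChar c]) := by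
  simp [pvStep, h]

theorem pv_step_space (t : List (List Char)) (b : List Char) (c : Char)
    (h1 : pvWordChar c = false) (h2 : PySem.Chars.isspace c = true) :
    pvStep (t, b) c = (if b.isEmpty then t else t ++ [b], []) := by
  simp [pvStep, h1, h2]

theorem pv_step_punct (t : List (List Char)) (b : List Char) (c : Char)
    (h1 : pvWordChar c = false) (h2 : PySem.Chars.isspace c = false) :
    pvStep (t, b) c
      = ((if b.isEmpty then t else t ++ [b]) ++ [[PySem.Chars.lowerChar c]], []) := by
  simp [pvStep, h1, h2]

theorem pv_main (ws : List Char)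
    (hws : ∀ w ∈ ws, PySem.Chars.isalnum w = false ∧ w ≠ '-') :
    ∀ (cs : List Char),
      (∀ c ∈ cs, pvWordChar c = false → PySem.Chars.isspace c = false → c ∈ ws) →
      ∀ (cur : List Char) (acc : List (List Char)),
      PySem.Chars.split₀.go ((cs.flatMap (pvE ws)).map PySem.Chars.lowerChar) cur acc
        = pvFinish (cs.foldl pvStep (acc.reverse, cur.reverse)) := by
  intro cs
  induction cs with
  | nil =>
    intro _ cur acc
    unfold pvFinish
    simp only [List.flatMap_nil, List.map_nil, List.foldl_nil]
    by_cases hc : cur = []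
    · subst hc; simp [PySem.Chars.split₀.go]
    · have h1 : cur.isEmpty = false := by simpa using hc
      have h2 : cur.reverse.isEmpty = false := by simpa using hc
      simp [PySem.Chars.split₀.go, h1, h2]
  | cons c cs ih =>
    intro hcs cur acc
    have hcs' : ∀ e ∈ cs, pvWordChar e = false → PySem.Chars.isspace e = false → e ∈ ws :=
      fun e he => hcs e (List.mem_cons_of_mem _ he)
    rw [List.flatMap_cons, List.map_append, List.foldl_cons]
    by_cases hw : pvWordChar c = true
    · -- word character: goes into the buffer
      have hnm : c ∉ ws := by
        intro hm
        obtain ⟨ha, hd⟩ := hws c hm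
        unfold pvWordChar at hw
        simp only [Bool.or_eq_true, beq_iff_eq] at hw
        rcases hw with hw | hw
        · rw [ha] at hw; cases hw
        · exact hd hw
      rw [pv_E_not_mem ws c hnm]
      simp only [List.map_cons, List.map_nil, List.singleton_append]
      rw [pv_go_word _ _ _ _ (by rw [pv_isspace_lowerChar]; exact pv_word_not_space c hw)]
      rw [ih hcs' (PySem.Chars.lowerChar c :: cur) acc]
      rw [pv_step_word _ _ _ hw]
      simp
    · have hwf : pvWordChar c = false := by simpa using hw
      by_cases hs : PySem.Chars.isspace c = true
      · -- whitespace: flushes the buffer, emits nothing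
        obtain ⟨hne, hsp⟩ := pv_E_space ws c hs
        have hne' : (pvE ws c).map PySem.Chars.lowerChar ≠ [] := by simpa using hne
        have hsp' : ∀ d ∈ (pvE ws c).map PySem.Chars.lowerChar,
            PySem.Chars.isspace d = true := by
          intro d hd
          rw [List.mem_map] at hd
          obtain ⟨e, he, rfl⟩ := hd
          rw [pv_isspace_lowerChar]; exact hsp e he
        rw [pv_go_flush _ hne' hsp']
        rw [ih hcs' [] (if cur.isEmpty then acc else cur.reverse :: acc)]
        rw [pv_step_space _ _ _ hwf hs]
        by_cases hc : cur = []
        · subst hc; simp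
        · have h1 : cur.isEmpty = false := by simpa using hc
          have h2 : cur.reverse.isEmpty = false := by simpa using hc
          simp [h1, h2]
      · -- punctuation: flushes the buffer and becomes its own token
        have hs' : PySem.Chars.isspace c = false := by simpa using hs
        have hmem : c ∈ ws := hcs c (List.mem_cons_self ..) hwf hs'
        have halnum : PySem.Chars.isalnum c = false := by
          unfold pvWordChar at hw
          simp only [Bool.or_eq_true, beq_iff_eq, not_or] at hw
          simpa using hw.1
        have hlc : PySem.Chars.lowerChar c = c := pv_lowerChar_of_not_alnum c halnum
        obtain ⟨sp1, sp2, heq, hn1, hn2, hs1, hs2⟩ := pv_E_punct ws c hmem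
        rw [heq]
        have hmap : (sp1 ++ c :: sp2).map PySem.Chars.lowerChar
            = sp1.map PySem.Chars.lowerChar ++ c :: sp2.map PySem.Chars.lowerChar := by
          rw [List.map_append, List.map_cons, hlc]
        rw [hmap]
        have hsp1' : ∀ d ∈ sp1.map PySem.Chars.lowerChar, PySem.Chars.isspace d = true := by
          intro d hd; rw [List.mem_map] at hd; obtain ⟨e, he, rfl⟩ := hd
          rw [pv_isspace_lowerChar]; exact hs1 e he
        have hsp2' : ∀ d ∈ sp2.map PySem.Chars.lowerChar, PySem.Chars.isspace d = true := by
          intro d hd; rw [List.mem_map] at hd; obtain ⟨e, he, rfl⟩ := hd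
          rw [pv_isspace_lowerChar]; exact hs2 e he
        rw [List.append_assoc, pv_go_flush _ (by simpa using hn1) hsp1']
        rw [List.cons_append, pv_go_word _ _ _ _ hs']
        rw [pv_go_flush _ (by simpa using hn2) hsp2']
        rw [show (([c] : List Char).isEmpty) = false from rfl]
        rw [if_neg (by exact Bool.false_ne_true)]
        rw [show ([c] : List Char).reverse = [c] from rfl]
        rw [ih hcs' [] ([c] :: (if cur.isEmpty then acc else cur.reverse :: acc))]
        rw [pv_step_punct _ _ _ hwf hs']
        rw [hlc]
        by_cases hc : cur = []
        · subst hc; simp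
        · have h1 : cur.isEmpty = false := by simpa using hc
          have h2 : cur.reverse.isEmpty = false := by simpa using hc
          simp [h1, h2]

-- ## B's String-level fold is the chars-level fold under map String.ofList
theorem pv_alt_fold (cs : List Char) :
    ∀ (t : List (List Char)) (b : List Char),
      cs.foldl
        (fun (st : List String × List Char) ch =>
          if PySem.Chars.isalnum ch || ch == '-' then
            (st.1, st.2 ++ [PySem.Chars.lowerChar ch])
          else
            let tokens := if st.2.isEmpty then st.1 else st.1 ++ [String.ofList st.2]
            if PySem.Chars.isspace ch then (tokens, [])
            else (tokens ++ [String.ofList [PySem.Chars.lowerChar ch]], []))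
        (t.map String.ofList, b)
      = ((cs.foldl pvStep (t, b)).1.map String.ofList, (cs.foldl pvStep (t, b)).2) := by
  induction cs with
  | nil => intro t b; rfl
  | cons c cs ih =>
    intro t b
    rw [List.foldl_cons, List.foldl_cons]
    unfold pvStep pvWordChar
    by_cases hw : (PySem.Chars.isalnum c || c == '-') = true
    · rw [if_pos hw]
      simp only [if_pos hw]
      exact ih t (b ++ [PySem.Chars.lowerChar c])
    · rw [if_neg hw]
      simp only [if_neg hw]
      by_cases hs : PySem.Chars.isspace c = true
      · rw [if_pos hs]
        simp only [if_pos hs]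
        by_cases hb : b.isEmpty
        · simp only [if_pos hb]
          exact ih t []
        · simp only [if_neg hb]
          have : t.map String.ofList ++ [String.ofList b] = (t ++ [b]).map String.ofList := by
            simp
          rw [this]
          exact ih (t ++ [b]) []
      · rw [if_neg hs]
        simp only [if_neg hs]
        by_cases hb : b.isEmpty
        · simp only [if_pos hb]
          have : t.map String.ofList ++ [String.ofList [PySem.Chars.lowerChar c]]
              = (t ++ [[PySem.Chars.lowerChar c]]).map String.ofList := by simp
          rw [this]
          exact ih (t ++ [[PySem.Chars.lowerChar c]]) []
        · simp only [if_neg hb]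
          have : t.map String.ofList ++ [String.ofList b] ++ [String.ofList [PySem.Chars.lowerChar c]]
              = (t ++ [b] ++ [[PySem.Chars.lowerChar c]]).map String.ofList := by simp
          rw [this]
          exact ih (t ++ [b] ++ [[PySem.Chars.lowerChar c]]) []

-- ## A's String-level replace fold at the Chars level
theorem pv_str_fold_toList (ws : List Char) :
    ∀ (s : String),
      (ws.foldl
        (fun s letter =>
          PySem.Str.replace s (String.ofList [letter]) (String.ofList [' ', letter, ' '])) s).toList
      = ws.foldl (fun l letter => PySem.Chars.replace l [letter] [' ', letter, ' ']) s.toList := by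
  induction ws with
  | nil => intro s; rfl
  | cons x ws ih =>
    intro s
    rw [List.foldl_cons, List.foldl_cons, ih]
    congr 1
    unfold PySem.Str.replace
    simp

-- ===== VERDICT (by name: the statement is the Claim_ definition above) =====
theorem split_in_words_py_spec : Claim_equal_split_in_words_py := by
  unfold Claim_equal_split_in_words_py
  intro sentence _
  unfold Spec_split_in_words_py split_in_words_py split_in_words_py_alt
  simp only []
  set cs := sentence.toList with hcs_def
  set ws := cs.foldl (fun wl letter =>
    if !(wl ++ ['-']).contains letter && !PySem.Chars.isalnum letter then wl ++ [letter] else wl)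
    [] with hws_def
  have hwm : ∀ c, c ∈ ws ↔ (c ∈ cs ∧ PySem.Chars.isalnum c = false ∧ c ≠ '-') := by
    intro c
    rw [hws_def, pv_wrong_mem cs [] c]
    simp
  have hws : ∀ w ∈ ws, PySem.Chars.isalnum w = false ∧ w ≠ '-' :=
    fun w hw => ((hwm w).1 hw).2
  have hcs : ∀ c ∈ cs, pvWordChar c = false → PySem.Chars.isspace c = false → c ∈ ws := by
    intro c hc hw _
    refine (hwm c).2 ⟨hc, ?_, ?_⟩
    · unfold pvWordChar at hw
      simp only [Bool.or_eq_false_iff] at hw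
      exact hw.1
    · unfold pvWordChar at hw
      simp only [Bool.or_eq_false_iff, beq_eq_false_iff_ne, ne_eq] at hw
      exact hw.2
  -- A side
  have hAstep : (ws.foldl
      (fun s letter =>
        PySem.Str.replace s (String.ofList [letter]) (String.ofList [' ', letter, ' '])) sentence).toList
      = cs.flatMap (pvE ws) := by
    rw [pv_str_fold_toList ws sentence, ← hcs_def]
    rw [show (fun l letter => PySem.Chars.replace l [letter] [' ', letter, ' '])
        = (fun l (x : Char) => l.flatMap (pvExp x)) from
      funext fun l => funext fun x => pv_replace_single x l]
    exact pv_foldl_flatMap ws cs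
  have hA : PySem.Str.split₀ (PySem.Str.lower (ws.foldl
      (fun s letter =>
        PySem.Str.replace s (String.ofList [letter]) (String.ofList [' ', letter, ' '])) sentence))
      = (pvFinish (cs.foldl pvStep ([], []))).map String.ofList := by
    unfold PySem.Str.split₀ PySem.Str.lower PySem.Chars.split₀ PySem.Chars.lower
    rw [show ∀ l : List Char, (String.ofList l).toList = l from fun l => by simp]
    rw [hAstep]
    congr 1
    have := pv_main ws hws cs hcs [] []
    simpa using this
  rw [hA]
  -- B side
  have hB := pv_alt_fold cs [] []
  simp only [List.map_nil] at hB
  rw [hB]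
  unfold pvFinish
  by_cases hb : (cs.foldl pvStep ([], [])).2.isEmpty
  · rw [if_pos hb, if_pos hb]
  · rw [if_neg hb, if_neg hb]
    simp
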